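-- pv_equiv track=rewrite | github.com/obrunet/Apprendre-a-programmer-Python3 | 09.04.triple_space.py | tripleSpaceOfaLine
-- ===== SOURCE A (Python) =====
-- def tripleSpaceOfaLine (st):
--     i, retStr = 0, ""
--     while i < len (st):
--         if st[i] == " ":
--             retStr = retStr + "   "
--         else:
--             retStr = retStr + st[i]
--         i = i+1
--     return retStr
-- ===== SOURCE B (Python) =====
-- def tripleSpaceOfaLine(st):
--     return "   ".join(st.split(" "))
-- ===== Notes on version B (the rewrite author's own statement) =====
-- stated objective: faster
-- what changed: Replaces the index-based while loop with per-character quadratic string concatenation by a two-phase split-on-space / join-with-three-spaces pipeline.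
import Mathlib
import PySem

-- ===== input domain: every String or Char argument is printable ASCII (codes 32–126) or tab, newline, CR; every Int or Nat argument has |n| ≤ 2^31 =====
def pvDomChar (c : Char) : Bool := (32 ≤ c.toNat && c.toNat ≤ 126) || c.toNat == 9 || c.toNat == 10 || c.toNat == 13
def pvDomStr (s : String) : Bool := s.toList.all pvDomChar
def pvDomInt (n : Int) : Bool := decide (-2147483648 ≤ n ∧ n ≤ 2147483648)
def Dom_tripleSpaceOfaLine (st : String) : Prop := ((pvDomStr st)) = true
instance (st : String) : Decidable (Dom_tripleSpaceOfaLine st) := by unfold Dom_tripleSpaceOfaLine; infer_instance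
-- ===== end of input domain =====

-- B replaces A's per-character while loop by an idiomatic split-on-space / join-with-three-spaces pipeline.


-- ===== PORT A =====
-- the while loop: scans the characters in order, appending "   " for a space and the character otherwise
def tsGo (cs : List Char) (retStr : List Char) : List Char :=
  match cs with
  | [] => retStr
  | c :: rest => if c = ' ' then tsGo rest (retStr ++ [' ', ' ', ' ']) else tsGo rest (retStr ++ [c])

def tripleSpaceOfaLine (st : String) : String := String.ofList (tsGo st.toList [])

-- ===== PORT B =====
-- "   ".join(st.split(" "))  (sep is the nonempty literal " ", so split is Chars.splitOn)
def tripleSpaceOfaLine_alt (st : String) : String :=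
  String.ofList (PySem.Chars.join "   ".toList (PySem.Chars.splitOn st.toList " ".toList))

-- ===== PRECONDITION & SPEC =====
def Spec_tripleSpaceOfaLine (st : String) (out : String) : Prop := out = tripleSpaceOfaLine_alt st
instance (st : String) (out : String) : Decidable (Spec_tripleSpaceOfaLine st out) := by unfold Spec_tripleSpaceOfaLine; infer_instance

-- ===== CLAIM (what is proved, stated in full; the proofs are below) =====
def Claim_equal_tripleSpaceOfaLine : Prop := ∀ (st : String), Dom_tripleSpaceOfaLine st → Spec_tripleSpaceOfaLine st (tripleSpaceOfaLine st)

-- ===== LEMMAS AND PROOFS =====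

-- the common characterisation: each character maps to "   " or itself
def tsChar (c : Char) : List Char := if c = ' ' then [' ', ' ', ' '] else [c]

lemma tsGo_eq (cs : List Char) : ∀ acc, tsGo cs acc = acc ++ cs.flatMap tsChar := by
  induction cs with
  | nil => intro acc; simp [tsGo]
  | cons c rest ih =>
    intro acc
    by_cases h : c = ' ' <;> simp [tsGo, h, ih, tsChar, List.append_assoc]

-- a simple structural model of splitting on a single space
def mySplit (cur : List Char) : List Char → List (List Char)
  | [] => [cur]
  | c :: rest => if c = ' ' then cur :: mySplit [] rest else mySplit (cur ++ [c]) rest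

lemma splitOn_go_eq (fuel : Nat) : ∀ (l cur : List Char) (accl : List (List Char)),
    l.length < fuel →
    PySem.Chars.splitOn.go [' '] fuel l cur accl = accl.reverse ++ mySplit cur.reverse l := by
  induction fuel with
  | zero => intro l _ _ h; omega
  | succ fuel ih =>
    intro l cur accl h
    cases l with
    | nil => simp [PySem.Chars.splitOn.go, mySplit]
    | cons c rest =>
      by_cases hc : c = ' '
      · subst hc
        simp only [PySem.Chars.splitOn.go, List.isPrefixOf]
        simp only [beq_self_eq_true, Bool.true_and, if_pos]
        have hd : List.drop [' '].length (' ' :: rest) = rest := rfl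
        rw [hd, ih rest [] (cur.reverse :: accl) (by simpa using Nat.lt_of_succ_lt_succ h)]
        simp [mySplit]
      · simp only [PySem.Chars.splitOn.go, List.isPrefixOf]
        rw [if_neg (by simp; intro hec; exact hc hec.symm)]
        rw [ih rest (c :: cur) accl (by simpa using Nat.lt_of_succ_lt_succ h)]
        simp [mySplit, hc]

lemma splitOn_eq_mySplit (cs : List Char) :
    PySem.Chars.splitOn cs [' '] = mySplit [] cs := by
  unfold PySem.Chars.splitOn
  rw [splitOn_go_eq (cs.length + 1) cs [] [] (by omega)]
  simp

lemma mySplit_ne_nil : ∀ (cs cur : List Char), mySplit cur cs ≠ [] := by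
  intro cs
  induction cs with
  | nil => intro cur; simp [mySplit]
  | cons c rest ih =>
    intro cur
    by_cases h : c = ' ' <;> simp [mySplit, h, ih]

lemma join_mySplit (cs : List Char) : ∀ cur,
    PySem.Chars.join [' ', ' ', ' '] (mySplit cur cs) = cur ++ cs.flatMap tsChar := by
  induction cs with
  | nil => intro cur; simp [mySplit, PySem.Chars.join_singleton]
  | cons c rest ih =>
    intro cur
    by_cases h : c = ' '
    · subst h
      obtain ⟨p, ps, hrest⟩ := List.exists_cons_of_ne_nil (mySplit_ne_nil rest [])
      have hstep : mySplit cur (' ' :: rest) = cur :: p :: ps := by simp [mySplit, hrest]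
      rw [hstep, PySem.Chars.join_cons_cons, ← hrest, ih]
      simp [tsChar, List.append_assoc]
    · simp only [mySplit, if_neg h]
      rw [ih]
      simp [tsChar, h, List.append_assoc]

-- ===== VERDICT (by name: the statement is the Claim_ definition above) =====
theorem tripleSpaceOfaLine_spec : Claim_equal_tripleSpaceOfaLine := by
  intro st _
  unfold Spec_tripleSpaceOfaLine tripleSpaceOfaLine tripleSpaceOfaLine_alt
  rw [tsGo_eq]
  have hsep : (" ".toList : List Char) = [' '] := rfl
  have hjoin : ("   ".toList : List Char) = [' ', ' ', ' '] := rfl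
  rw [hsep, hjoin, splitOn_eq_mySplit, join_mySplit]
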